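-- pv_equiv track=rewrite | github.com/Dinoosawruss/AOC2020 | Day 4/AOC4.py | part1
-- ===== SOURCE A (Python) =====
-- def part1(inp):
--     total = 0
--
--     validKeys = ['byr', 'iyr', 'eyr','hgt','hcl','ecl','pid']
--     passports = {}
--
--     for line in inp:
--         if line != "":
--             for keyValuePair in line.split():
--                 key, value = keyValuePair.split(":")
--
--                 passports[key] = value
--
--         else:
--             valid = True
--
--             for key in validKeys:
--                 if key not in passports.keys():
--                     valid = False
--
--             if valid:
--                 total += 1
--
--             passports = {}
--
--     return total
-- ===== SOURCE B (Python) =====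
-- def part1(inp):
--     validKeys = ['byr', 'iyr', 'eyr', 'hgt', 'hcl', 'ecl', 'pid']
--     # inverted index: for each required key, the set of record numbers where it occurs;
--     # a line's record number = how many blank lines precede it, and exactly the
--     # records numbered 0..closed-1 are terminated by a blank line
--     closed = inp.count("")
--     found = {k: set() for k in validKeys}
--     rec = 0
--     for line in inp:
--         if line == "":
--             rec += 1
--         else:
--             for tok in line.split():
--                 key, value = tok.split(":")
--                 if key in found:
--                     found[key].add(rec)
--     common = set(range(closed))
--     for k in validKeys:
--         common &= found[k]
--     return len(common)
-- ===== Notes on version B (the rewrite author's own statement) =====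
-- stated objective: alternative
-- what changed: A scans once keeping a per-record dict and checks the seven keys at each blank line; B builds an inverted index (required key -> set of record numbers, a record number being the count of preceding blank lines) and returns the size of the intersection of the seven index sets with the set of terminated record numbers.
import Mathlib
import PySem

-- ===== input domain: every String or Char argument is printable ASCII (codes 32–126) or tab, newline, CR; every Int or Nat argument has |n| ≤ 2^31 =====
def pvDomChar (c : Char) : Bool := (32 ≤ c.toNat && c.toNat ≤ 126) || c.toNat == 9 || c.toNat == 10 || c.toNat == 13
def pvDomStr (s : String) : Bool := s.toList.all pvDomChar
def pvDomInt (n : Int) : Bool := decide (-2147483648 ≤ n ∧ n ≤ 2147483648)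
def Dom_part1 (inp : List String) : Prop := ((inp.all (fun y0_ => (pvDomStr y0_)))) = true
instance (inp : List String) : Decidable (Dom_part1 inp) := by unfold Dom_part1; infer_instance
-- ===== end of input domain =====

-- B replaces A's running per-record dict + per-blank-line check by an inverted index
-- (required key -> set of record numbers) intersected at the end; same cost, different algorithm.

-- ===== PORT A =====
def pvValidKeys : List String := ["byr", "iyr", "eyr", "hgt", "hcl", "ecl", "pid"]

-- one iteration of A's 'for line in inp' loop; state = (total, passports)
def part1Step (st : Int × PySem.Dict String String) (line : String) : Int × PySem.Dict String String :=
  if line ≠ "" then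
    (st.1, (PySem.Str.split₀ line).foldl (fun d kv =>
      match (PySem.Str.split? kv ":").getD [] with
      | [key, value] => d.insert key value
      | _ => d)      -- kv.split(":") with ≠ 2 parts raises ValueError in Python; excluded by Pre_part1
      st.2)
  else
    let valid := pvValidKeys.foldl (fun valid key =>
      if (st.2.keys).contains key then valid else false) true
    (if valid then st.1 + 1 else st.1, PySem.Dict.empty)

def part1 (inp : List String) : Int :=
  (inp.foldl part1Step (0, PySem.Dict.empty)).1

-- ===== PORT B =====
-- B's inner token loop: 'key, value = tok.split(":"); if key in found: found[key].add(rec)'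
-- (the default of modify is never used because it runs only under 'contains'; exact for found[key].add)
def part1AltLineStep (rec : Int) (d : PySem.Dict String (PySem.Set Int)) (tok : String) :
    PySem.Dict String (PySem.Set Int) :=
  match (PySem.Str.split? tok ":").getD [] with
  | [key, _value] =>
    if d.contains key then d.modify key PySem.Set.empty (fun s => PySem.Set.add s rec) else d
  | _ => d      -- tok.split(":") with ≠ 2 parts raises ValueError in Python; excluded by Pre_part1

-- one iteration of B's 'for line in inp' loop; state = (found, rec)
def part1AltStep (st : PySem.Dict String (PySem.Set Int) × Int) (line : String) :
    PySem.Dict String (PySem.Set Int) × Int :=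
  if line = "" then (st.1, st.2 + 1)
  else ((PySem.Str.split₀ line).foldl (part1AltLineStep st.2) st.1, st.2)

def part1_alt (inp : List String) : Int :=
  let closed : Int := (PySem.List.count inp "" : Int)
  let found0 : PySem.Dict String (PySem.Set Int) :=
    pvValidKeys.foldl (fun d k => d.insert k PySem.Set.empty) PySem.Dict.empty
  let res := inp.foldl part1AltStep (found0, 0)
  let common0 : PySem.Set Int := PySem.Set.ofList (PySem.List.pyRange 0 closed)
  -- found[k] never raises KeyError here: found's keys are exactly validKeys; getD is exact
  let common := pvValidKeys.foldl (fun c k => PySem.Set.inter c (res.1.getD k PySem.Set.empty)) common0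
  PySem.Set.len common

-- ===== PRECONDITION & SPEC =====
-- Pre_ excludes exactly the inputs where A raises ValueError (unpacking): a whitespace
-- token of a non-blank line that does not split on ":" into exactly two parts.
def Pre_part1 (inp : List String) : Prop :=
  ∀ line ∈ inp, line ≠ "" →
    ∀ tok ∈ PySem.Str.split₀ line, ((PySem.Str.split? tok ":").getD []).length = 2
instance (inp : List String) : Decidable (Pre_part1 inp) := by unfold Pre_part1; infer_instance

def pvWitness_part1 : List String := ["byr:1 iyr:2 eyr:3", "hgt:4 hcl:5 ecl:6 pid:7", "", "byr:9", ""]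

def Spec_part1 (inp : List String) (out : Int) : Prop := out = part1_alt inp
instance (inp : List String) (out : Int) : Decidable (Spec_part1 inp out) := by unfold Spec_part1; infer_instance

-- ===== CLAIM (what is proved, stated in full; the proofs are below) =====
def Claim_equal_part1 : Prop := ∀ (inp : List String), Dom_part1 inp → Pre_part1 inp → Spec_part1 inp (part1 inp)

-- ===== LEMMAS AND PROOFS =====

-- the key piece of a token (first piece of tok.split(":"); proof-side helper)
def pvKeyOf (tok : String) : String := ((PySem.Str.split? tok ":").getD []).headD ""

-- reference grouping pass: state = (closed records as key lists, keys of the current record)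
def pvGStep (st : List (List String) × List String) (line : String) :
    List (List String) × List String :=
  if line = "" then (st.1 ++ [st.2], []) else (st.1, st.2 ++ (PySem.Str.split₀ line).map pvKeyOf)

def pvOK (g : List String) : Bool := pvValidKeys.all (fun k => g.contains k)

theorem pvAllCongrMem {l : List String} {f g : String → Bool}
    (h : ∀ x ∈ l, f x = g x) : l.all f = l.all g := by
  induction l with
  | nil => rfl
  | cons x xs ih =>
    simp only [List.all_cons, h x (List.mem_cons_self ..),
      ih (fun y hy => h y (List.mem_cons_of_mem _ hy))]

-- A's 'for key in validKeys: if key not in …: valid = False' loop is an 'all'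
theorem pvValid_fold (f : String → Bool) (b : Bool) (l : List String) :
    l.foldl (fun valid key => if f key then valid else false) b = (b && l.all f) := by
  induction l generalizing b with
  | nil => simp
  | cons x xs ih =>
    rw [List.foldl_cons, ih]
    cases hfx : f x <;> cases b <;> simp [hfx]

-- A's token loop: dict-key membership tracks the accumulated key list
theorem pvATok (toks : List String) (d : PySem.Dict String String) (cur : List String)
    (hp : ∀ tok ∈ toks, ((PySem.Str.split? tok ":").getD []).length = 2)
    (h : ∀ k, d.contains k = cur.contains k) :
    ∀ k, (toks.foldl (fun d kv =>
            match (PySem.Str.split? kv ":").getD [] with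
            | [key, value] => d.insert key value
            | _ => d) d).contains k
        = (cur ++ toks.map pvKeyOf).contains k := by
  induction toks generalizing d cur with
  | nil => simpa using h
  | cons tok toks ih =>
    have h2 := hp tok (List.mem_cons_self ..)
    obtain ⟨a, b, hab⟩ : ∃ a b, (PySem.Str.split? tok ":").getD [] = [a, b] := by
      match hl : (PySem.Str.split? tok ":").getD [] with
      | [a, b] => exact ⟨a, b, rfl⟩
      | [] | [_] | _ :: _ :: _ :: _ => rw [hl] at h2; simp at h2
    have hk : pvKeyOf tok = a := by simp [pvKeyOf, hab]
    simp only [List.foldl_cons, hab, List.map_cons, hk]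
    intro k
    rw [show cur ++ a :: toks.map pvKeyOf = (cur ++ [a]) ++ toks.map pvKeyOf by simp]
    refine ih _ _ (fun t ht => hp t (List.mem_cons_of_mem _ ht)) ?_ k
    intro k'
    rw [PySem.Dict.contains_insert, h k', List.contains_append]
    cases h' : k' == a <;> simp_all

-- A's main loop: running total counts the valid closed records
theorem pvAMain (inp : List String) (t : Int) (d : PySem.Dict String String)
    (done : List (List String)) (cur : List String)
    (hp : ∀ line ∈ inp, line ≠ "" →
            ∀ tok ∈ PySem.Str.split₀ line, ((PySem.Str.split? tok ":").getD []).length = 2)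
    (h : ∀ k, d.contains k = cur.contains k)
    (ht : t = (done.countP pvOK : Int)) :
    (inp.foldl part1Step (t, d)).1 = (((inp.foldl pvGStep (done, cur)).1.countP pvOK : Nat) : Int) := by
  induction inp generalizing t d done cur with
  | nil => simpa using ht
  | cons line rest ih =>
    have hrest : ∀ l ∈ rest, l ≠ "" →
        ∀ tok ∈ PySem.Str.split₀ l, ((PySem.Str.split? tok ":").getD []).length = 2 :=
      fun l hl => hp l (List.mem_cons_of_mem _ hl)
    by_cases hline : line = ""
    · subst hline
      simp only [List.foldl_cons, part1Step, pvGStep, ne_eq, not_true_eq_false, if_false, if_true]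
      refine ih _ _ _ _ hrest (fun k => by simp [PySem.Dict.contains_empty]) ?_
      have hvalid : pvValidKeys.all (fun key => (d.keys).contains key) = pvOK cur := by
        refine pvAllCongrMem (fun k _ => ?_)
        rw [← h k, PySem.Dict.contains_eq_decide_mem_keys, List.contains_eq_mem]
      rw [pvValid_fold, Bool.true_and, hvalid, List.countP_append]
      push_cast
      rw [← ht]
      by_cases hok : pvOK cur = true <;> simp [hok]
    · simp only [List.foldl_cons, part1Step, pvGStep, ne_eq, hline, not_false_eq_true,
        if_true, if_false]
      exact ih _ _ _ _ hrest (pvATok _ _ _ (hp line (List.mem_cons_self ..) hline) h) ht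

-- the inverted index B should hold for key k after grouping state (done, cur)
def pvIdx (k : String) (done : List (List String)) (cur : List String) : PySem.Set Int :=
  ((List.range done.length).filter (fun r => (done.getD r []).contains k)).map Int.ofNat
    ++ (if cur.contains k then [(done.length : Int)] else [])

theorem pvIdx_contains (k : String) (done : List (List String)) (cur : List String)
    (j : Nat) (hj : j < done.length) :
    (pvIdx k done cur).contains ((j : Nat) : Int) = (done.getD j []).contains k := by
  simp only [pvIdx, PySem.Set.contains]
  rw [List.contains_append]
  have h2 : (if cur.contains k then [(done.length : Int)] else []).contains ((j : Nat) : Int) = false := by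
    split
    · simp only [List.contains_eq_mem, List.mem_singleton, decide_eq_false_iff_not]
      omega
    · rfl
  rw [h2, Bool.or_false, List.contains_eq_mem, List.contains_eq_mem, decide_eq_decide]
  rw [List.mem_map]
  constructor
  · rintro ⟨r, hr, he⟩
    rw [List.mem_filter, List.mem_range] at hr
    have : r = j := Int.ofNat.inj he
    subst this
    simpa using hr.2
  · intro hk
    exact ⟨j, by rw [List.mem_filter, List.mem_range]; exact ⟨hj, by simpa using hk⟩, rfl⟩

-- B's token loop preserves the inverted-index invariant
theorem pvIdx_snoc_ne (k a : String) (done : List (List String)) (cur : List String)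
    (h : k ≠ a) : pvIdx k done (cur ++ [a]) = pvIdx k done cur := by
  have : ((cur ++ [a]).contains k) = cur.contains k := by
    rw [List.contains_append]
    have : ([a].contains k) = false := by
      simp only [List.contains_eq_mem, List.mem_singleton, decide_eq_false_iff_not]
      exact h
    rw [this, Bool.or_false]
  rw [pvIdx, pvIdx, this]

theorem pvBTok (toks : List String) (d : PySem.Dict String (PySem.Set Int))
    (done : List (List String)) (cur : List String)
    (hp : ∀ tok ∈ toks, ((PySem.Str.split? tok ":").getD []).length = 2)
    (hkeys : d.keys = pvValidKeys)
    (hfound : ∀ k ∈ pvValidKeys, d.getD k PySem.Set.empty = pvIdx k done cur) :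
    (toks.foldl (part1AltLineStep (done.length : Int)) d).keys = pvValidKeys ∧
    ∀ k ∈ pvValidKeys, (toks.foldl (part1AltLineStep (done.length : Int)) d).getD k PySem.Set.empty
        = pvIdx k done (cur ++ toks.map pvKeyOf) := by
  induction toks generalizing d cur with
  | nil => simpa using ⟨hkeys, hfound⟩
  | cons tok toks ih =>
    have h2 := hp tok (List.mem_cons_self ..)
    obtain ⟨a, b, hab⟩ : ∃ a b, (PySem.Str.split? tok ":").getD [] = [a, b] := by
      match hl : (PySem.Str.split? tok ":").getD [] with
      | [a, b] => exact ⟨a, b, rfl⟩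
      | [] | [_] | _ :: _ :: _ :: _ => rw [hl] at h2; simp at h2
    have hkeq : pvKeyOf tok = a := by simp [pvKeyOf, hab]
    have hstep : part1AltLineStep (done.length : Int) d tok
        = if d.contains a then
            d.modify a PySem.Set.empty (fun s => PySem.Set.add s (done.length : Int))
          else d := by
      simp only [part1AltLineStep, hab]
    simp only [List.foldl_cons, List.map_cons, hkeq, hstep]
    rw [show cur ++ a :: toks.map pvKeyOf = (cur ++ [a]) ++ toks.map pvKeyOf by simp]
    refine ih _ _ (fun t ht => hp t (List.mem_cons_of_mem _ ht)) ?_ ?_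
    · -- keys are unchanged by one token step
      split
      · rw [PySem.Dict.keys_modify,
          PySem.Dict.keys_insert_of_contains _ _ (by assumption), hkeys]
      · exact hkeys
    · -- the inverted index gains record number done.length exactly for key a
      intro k hk
      by_cases hc : d.contains a = true
      · rw [if_pos hc]
        by_cases hka : k = a
        · rw [← hka] at hc ⊢
          rw [PySem.Dict.getD_modify_self, hfound k hk]
          by_cases hcur : cur.contains k = true
          · have hmem : (pvIdx k done cur).contains ((done.length : Nat) : Int) = true := by
              rw [pvIdx, PySem.Set.contains, List.contains_append, hcur, if_pos rfl]
              simp [List.contains_eq_mem]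
            rw [show PySem.Set.add (pvIdx k done cur) ((done.length : Nat) : Int)
                  = pvIdx k done cur from by rw [PySem.Set.add, if_pos hmem]]
            rw [pvIdx, pvIdx]
            have : ((cur ++ [k]).contains k) = true := by
              rw [List.contains_append, hcur]; rfl
            rw [this, hcur]
          · have hb : (cur.contains k) = false := by simpa using hcur
            have hmem : (pvIdx k done cur).contains ((done.length : Nat) : Int) = false := by
              rw [pvIdx, PySem.Set.contains, List.contains_append, hb, if_neg (by simp)]
              simp
            rw [PySem.Set.add, if_neg (by rw [hmem]; simp), pvIdx, pvIdx, hb]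
            have : ((cur ++ [k]).contains k) = true := by
              rw [List.contains_append]
              simp [List.contains_eq_mem]
            rw [this, if_neg (by simp), if_pos rfl, List.append_nil]
        · rw [PySem.Dict.getD_modify_of_ne _ _ _ hka, hfound k hk, pvIdx_snoc_ne _ _ _ _ hka]
      · rw [if_neg hc, hfound k hk, pvIdx_snoc_ne]
        intro he
        subst he
        rw [PySem.Dict.contains_eq_decide_mem_keys, hkeys] at hc
        simp [hk] at hc

theorem pvIdx_close (k : String) (done : List (List String)) (cur : List String) :
    pvIdx k (done ++ [cur]) [] = pvIdx k done cur := by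
  rw [pvIdx, pvIdx]
  have hlen : (done ++ [cur]).length = done.length + 1 := by simp
  rw [hlen, List.range_succ, List.filter_append, List.map_append]
  have h1 : (List.range done.length).filter (fun r => ((done ++ [cur]).getD r []).contains k)
      = (List.range done.length).filter (fun r => (done.getD r []).contains k) := by
    refine List.filter_congr (fun r hr => ?_)
    rw [List.mem_range] at hr
    rw [List.getD_append _ _ _ _ hr]
  have h2 : ((done ++ [cur]).getD done.length []) = cur := by simp
  rw [h1]
  simp only [List.filter_cons, List.filter_nil, h2]
  split <;> simp

-- B's main loop invariant
theorem pvBMain (inp : List String) (d : PySem.Dict String (PySem.Set Int)) (rec : Int)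
    (done : List (List String)) (cur : List String)
    (hp : ∀ line ∈ inp, line ≠ "" →
            ∀ tok ∈ PySem.Str.split₀ line, ((PySem.Str.split? tok ":").getD []).length = 2)
    (hkeys : d.keys = pvValidKeys) (hrec : rec = (done.length : Int))
    (hfound : ∀ k ∈ pvValidKeys, d.getD k PySem.Set.empty = pvIdx k done cur) :
    (inp.foldl part1AltStep (d, rec)).1.keys = pvValidKeys ∧
    (inp.foldl part1AltStep (d, rec)).2 = (((inp.foldl pvGStep (done, cur)).1.length : Nat) : Int) ∧
    ∀ k ∈ pvValidKeys, (inp.foldl part1AltStep (d, rec)).1.getD k PySem.Set.empty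
        = pvIdx k (inp.foldl pvGStep (done, cur)).1 (inp.foldl pvGStep (done, cur)).2 := by
  induction inp generalizing d rec done cur with
  | nil => exact ⟨hkeys, by simpa using hrec, hfound⟩
  | cons line rest ih =>
    have hrest : ∀ l ∈ rest, l ≠ "" →
        ∀ tok ∈ PySem.Str.split₀ l, ((PySem.Str.split? tok ":").getD []).length = 2 :=
      fun l hl => hp l (List.mem_cons_of_mem _ hl)
    by_cases hline : line = ""
    · subst hline
      simp only [List.foldl_cons, part1AltStep, pvGStep, if_pos]
      refine ih _ _ _ _ hrest hkeys (by simp [hrec]) ?_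
      intro k hk
      rw [hfound k hk, pvIdx_close]
    · simp only [List.foldl_cons, part1AltStep, pvGStep, hline, if_false]
      rw [hrec]
      obtain ⟨hk', hf'⟩ := pvBTok (PySem.Str.split₀ line) d done cur
        (hp line (List.mem_cons_self ..) hline) hkeys hfound
      exact ih _ _ _ _ hrest hk' rfl hf'

-- closed records = number of blank lines
theorem pvGLen (inp : List String) (done : List (List String)) (cur : List String) :
    ((inp.foldl pvGStep (done, cur)).1).length = done.length + List.count "" inp := by
  induction inp generalizing done cur with
  | nil => simp
  | cons line rest ih =>
    by_cases hline : line = ""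
    · subst hline
      simp only [List.foldl_cons, pvGStep, if_true, List.count_cons]
      rw [ih]; simp; omega
    · simp only [List.foldl_cons, pvGStep, hline, if_false]
      rw [ih]
      have hb : (line == "") = false := by simpa using hline
      simp [List.count_cons, hb]

-- B's final 'common &= found[k]' fold is a filter by the all-keys predicate
theorem pvInterFold (l : List String) (c : List Int) (f : String → List Int) :
    l.foldl (fun c k => PySem.Set.inter c (f k)) c
      = c.filter (fun r => l.all (fun k => (f k).contains r)) := by
  induction l generalizing c with
  | nil => simp
  | cons k l ih =>
    rw [List.foldl_cons, ih, PySem.Set.inter, List.filter_filter]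
    refine List.filter_congr (fun r _ => ?_)
    simp only [List.all_cons, PySem.Set.contains]
    rw [Bool.and_comm]

-- counting valid records through the index range
theorem pvRangeCountP (done : List (List String)) (P : List String → Bool) :
    (List.range done.length).countP (fun j => P (done.getD j [])) = done.countP P := by
  induction done using List.reverseRecOn with
  | nil => simp
  | append_singleton done g ih =>
    rw [List.length_append, List.length_cons, List.length_nil, Nat.zero_add, List.range_succ,
      List.countP_append, List.countP_append]
    congr 1
    · rw [← ih]
      refine List.countP_congr (fun j hj => ?_)
      rw [List.mem_range] at hj
      rw [List.getD_append _ _ _ _ hj]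
    · simp [List.countP_cons]

-- ===== VERDICT (by name: the statement is the Claim_ definition above) =====
theorem part1_spec : Claim_equal_part1 := by
  intro inp _ hp
  unfold Spec_part1
  have hA := pvAMain inp 0 PySem.Dict.empty [] [] hp
      (fun k => by simp [PySem.Dict.contains_empty]) (by simp)
  have hkeys0 : (pvValidKeys.foldl (fun d k => d.insert k PySem.Set.empty)
      PySem.Dict.empty : PySem.Dict String (PySem.Set Int)).keys = pvValidKeys := by decide
  have hfound0 : ∀ k ∈ pvValidKeys,
      (pvValidKeys.foldl (fun d k => d.insert k PySem.Set.empty)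
        PySem.Dict.empty : PySem.Dict String (PySem.Set Int)).getD k PySem.Set.empty
        = pvIdx k [] [] := by decide
  obtain ⟨hK, hrec, hF⟩ := pvBMain inp _ 0 [] [] hp hkeys0 (by simp) hfound0
  simp only [part1, part1_alt]
  rw [hA]
  have hclosed : ((PySem.List.count inp "" : Nat) : Int)
      = (((inp.foldl pvGStep ([], [])).1.length : Nat) : Int) := by
    rw [PySem.List.count_eq, pvGLen]; simp
  rw [hclosed, PySem.List.pyRange_zero_natCast]
  have hnd : (List.map (fun k => ((k : Nat) : Int))
      (List.range (List.foldl pvGStep ([], []) inp).1.length)).Nodup := by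
    refine List.Nodup.map ?_ List.nodup_range
    intro a b h
    simpa using h
  rw [PySem.Set.ofList_eq_self_of_nodup _ hnd]
  rw [pvInterFold, PySem.Set.len, List.filter_map, List.length_map]
  rw [← List.countP_eq_length_filter]
  rw [← pvRangeCountP]
  congr 1
  refine List.countP_congr (fun j hj => ?_)
  rw [List.mem_range] at hj
  have hsel : pvValidKeys.all (fun k =>
        List.contains ((inp.foldl part1AltStep
            (pvValidKeys.foldl (fun d k => d.insert k PySem.Set.empty) PySem.Dict.empty,
              0)).1.getD k PySem.Set.empty) ((j : Nat) : Int))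
      = pvOK ((inp.foldl pvGStep ([], [])).1.getD j []) := by
    refine pvAllCongrMem (fun k hk => ?_)
    rw [hF k hk]
    exact pvIdx_contains _ _ _ _ hj
  simp only [Function.comp_apply]
  rw [hsel]
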